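-- pv_equiv track=rewrite | github.com/SangjinH/algorithm | programmers/toss/1.py | solution
-- ===== SOURCE A (Python) =====
-- def solution(servers, sticky, requests):
--     # 각각의 서버를 만들어놓고
--     answer = [[] for _ in range(servers)]
--
--     if sticky:
--         answer[0].append(requests[0])
--
--         before = requests[0]
--         idx = 1
--         requests = requests[1:]
--         for i in range(len(requests)):
--             for j in range(len(answer)):
--                 flag = False
--                 if requests[i] in answer[j]:
--                     answer[j].append(requests[i])
--                     flag = True
--                     break
--             if not flag:
--                 answer[idx].append(requests[i])
--                 idx += 1
--                 idx %= len(answer)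
--
--     # sticky가 false면 공정하게 분배
--     else:
--         for i in range(len(requests)):
--             answer[i % (servers)].append(requests[i])
--
--     return answer
-- ===== SOURCE B (Python) =====
-- def solution(servers, sticky, requests):
--     answer = [[] for _ in range(servers)]
--
--     if sticky:
--         # pass 1: distinct request values in order of first appearance
--         distinct = []
--         for r in requests:
--             if r not in distinct:
--                 distinct.append(r)
--         # pass 2: each value's server is fixed by its first-appearance rank
--         for r in requests:
--             answer[distinct.index(r) % servers].append(r)
--     else:
--         for i in range(len(requests)):
--             answer[i % (servers)].append(requests[i])
--
--     return answer
-- ===== Notes on version B (the rewrite author's own statement) =====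
-- stated objective: alternative
-- what changed: A's fused single pass scans every server list for each request to decide placement; B first builds a first-appearance list of distinct values in one pass and then places each request at distinct.index(r) % servers in a second, independent pass.
-- crash fix: A raises IndexError on sticky inputs with empty requests (requests[0]) and on sticky servers==1 inputs containing a second distinct value (answer[idx] with idx=1 used before the mod); B returns the distributed server lists there. — e.g. on solution(1, true, [1, 2]): A raises IndexError, B returns [[1, 2]]
import Mathlib
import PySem

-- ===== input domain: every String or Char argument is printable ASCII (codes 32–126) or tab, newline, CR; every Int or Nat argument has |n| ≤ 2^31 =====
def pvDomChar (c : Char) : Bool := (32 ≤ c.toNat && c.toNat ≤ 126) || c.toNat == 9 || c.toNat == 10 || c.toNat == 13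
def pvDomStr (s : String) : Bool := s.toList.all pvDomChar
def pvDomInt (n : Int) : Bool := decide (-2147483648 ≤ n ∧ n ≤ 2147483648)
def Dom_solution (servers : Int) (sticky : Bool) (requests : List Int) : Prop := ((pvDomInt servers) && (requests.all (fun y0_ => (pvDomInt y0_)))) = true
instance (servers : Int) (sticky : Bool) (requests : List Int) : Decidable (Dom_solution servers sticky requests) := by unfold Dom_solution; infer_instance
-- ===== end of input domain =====

-- B replaces A's fused per-request scan of all server lists by two separate passes: first a
-- first-appearance table of distinct values, then a placement pass indexing into it (objective: alternative).

-- ===== PORT A =====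
-- inner 'for j in range(len(answer)): if requests[i] in answer[j]: … break' loop
def pvInnerA (r : Int) : List (List Int) → Nat → Option Nat
  | [], _ => none
  | l :: rest, j => if l.contains r then some j else pvInnerA r rest (j + 1)

-- one iteration of A's sticky for-loop; state = (answer, idx)
def pvStepA (st : List (List Int) × Int) (r : Int) : List (List Int) × Int :=
  match pvInnerA r st.1 0 with
  | some j => (st.1.modify j (fun l => l ++ [r]), st.2)
  | none => (st.1.modify st.2.toNat (fun l => l ++ [r]), PySem.Int.mod (st.2 + 1) (st.1.length : Int))

def solution (servers : Int) (sticky : Bool) (requests : List Int) : List (List Int) :=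
  let answer : List (List Int) := (PySem.List.pyRange 0 servers 1).map (fun _ => [])
  if sticky then
    let answer := answer.modify 0 (fun l => l ++ [PySem.List.pyGetD requests 0 0])
    let reqs := PySem.List.slice requests (some 1) none
    (reqs.foldl pvStepA (answer, 1)).1
  else
    (requests.foldl (fun (st : List (List Int) × Int) r =>
      (st.1.modify (PySem.Int.mod st.2 servers).toNat (fun l => l ++ [r]), st.2 + 1)) (answer, 0)).1

-- ===== PORT B =====
def solution_alt (servers : Int) (sticky : Bool) (requests : List Int) : List (List Int) :=
  let answer : List (List Int) := (PySem.List.pyRange 0 servers 1).map (fun _ => [])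
  if sticky then
    -- pass 1: distinct request values in order of first appearance
    let distinct := requests.foldl (fun d r => if d.contains r then d else d ++ [r]) []
    -- pass 2: each value's server is its first-appearance rank mod servers
    -- (distinct.index r always finds r here, so the getD default is never used)
    requests.foldl (fun ans r =>
      ans.modify (PySem.Int.mod ((((PySem.List.index? distinct r).getD 0 : Nat)) : Int) servers).toNat
        (fun l => l ++ [r])) answer
  else
    (requests.foldl (fun (st : List (List Int) × Int) r =>
      (st.1.modify (PySem.Int.mod st.2 servers).toNat (fun l => l ++ [r]), st.2 + 1)) (answer, 0)).1

-- ===== PRECONDITION & SPEC =====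
-- Pre excludes exactly the inputs where the Python A raises (IndexError / ZeroDivisionError):
-- nonpositive servers (except the trivial non-sticky empty-request case), sticky with empty requests
-- (requests[0]), and sticky with servers == 1 and a second distinct value (answer[idx] with idx = 1).
def Pre_solution (servers : Int) (sticky : Bool) (requests : List Int) : Prop :=
  if sticky then
    1 ≤ servers ∧ requests ≠ [] ∧
      (servers = 1 → requests.all (fun r => r == requests.headI) = true)
  else 1 ≤ servers ∨ requests = []
instance (servers : Int) (sticky : Bool) (requests : List Int) : Decidable (Pre_solution servers sticky requests) := by unfold Pre_solution; infer_instance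

def pvWitness_solution : Int × Bool × List Int := (2, true, [5, 3, 5, 7, 3])

-- A raises IndexError where sticky requests are empty, or servers == 1 and a second distinct value
-- appears (its idx = 1 is used before being reduced mod 1); B returns the distributed lists there.
def Raises_solution (servers : Int) (sticky : Bool) (requests : List Int) : Prop :=
  sticky = true ∧
    (requests = [] ∨ (servers = 1 ∧ requests.any (fun r => r != requests.headI) = true))
instance (servers : Int) (sticky : Bool) (requests : List Int) : Decidable (Raises_solution servers sticky requests) := by unfold Raises_solution; infer_instance

def pvRaiseWitness_solution : Int × Bool × List Int := (1, true, [1, 2])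
def pvRaiseWitnessOut_solution : List (List Int) := [[1, 2]]

def Spec_solution (servers : Int) (sticky : Bool) (requests : List Int) (out : List (List Int)) : Prop := out = solution_alt servers sticky requests
instance (servers : Int) (sticky : Bool) (requests : List Int) (out : List (List Int)) : Decidable (Spec_solution servers sticky requests out) := by unfold Spec_solution; infer_instance

-- ===== CLAIM (what is proved, stated in full; the proofs are below) =====
def Claim_equal_solution : Prop := ∀ (servers : Int) (sticky : Bool) (requests : List Int), Dom_solution servers sticky requests → Pre_solution servers sticky requests → Spec_solution servers sticky requests (solution servers sticky requests)

def Claim_raises_solution : Prop := (∀ (servers : Int) (sticky : Bool) (requests : List Int), Dom_solution servers sticky requests → Raises_solution servers sticky requests → ¬ Pre_solution servers sticky requests) ∧ (Dom_solution (pvRaiseWitness_solution.1) (pvRaiseWitness_solution.2.1) (pvRaiseWitness_solution.2.2) ∧ Raises_solution (pvRaiseWitness_solution.1) (pvRaiseWitness_solution.2.1) (pvRaiseWitness_solution.2.2) ∧ solution_alt (pvRaiseWitness_solution.1) (pvRaiseWitness_solution.2.1) (pvRaiseWitness_solution.2.2) = pvRaiseWitnessOut_solution)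

-- ===== LEMMAS AND PROOFS =====

-- B's pass-1 accumulator: distinct values of xs (after d) in order of first appearance
def pvDist (d : List Int) (xs : List Int) : List Int :=
  xs.foldl (fun d r => if d.contains r then d else d ++ [r]) d

-- server index of value r given the full distinct list D and server count n
def pvIdx (D : List Int) (n : Nat) (r : Int) : Nat :=
  ((PySem.List.index? D r).getD 0) % n

-- the shape both sticky computations reach after placing the prefix `pre`
def pvTable (D : List Int) (n : Nat) (pre : List Int) : List (List Int) :=
  (List.range n).map (fun j => pre.filter (fun r => pvIdx D n r == j))

lemma pvDist_prefix (xs : List Int) : ∀ d, d <+: pvDist d xs := by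
  induction xs with
  | nil => intro d; exact List.prefix_refl d
  | cons x xs ih =>
    intro d
    show d <+: pvDist (if d.contains x then d else d ++ [x]) xs
    by_cases h : d.contains x
    · rw [if_pos h]; exact ih d
    · rw [if_neg h]; exact (List.prefix_append d [x]).trans (ih (d ++ [x]))

lemma mem_pvDist (xs : List Int) : ∀ d x, x ∈ pvDist d xs ↔ x ∈ d ∨ x ∈ xs := by
  induction xs with
  | nil => intro d x; simp [pvDist]
  | cons y ys ih =>
    intro d x
    show x ∈ pvDist (if d.contains y then d else d ++ [y]) ys ↔ _
    by_cases h : d.contains y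
    · rw [if_pos h, ih d x]
      have hy : y ∈ d := by simpa using h
      constructor
      · rintro (h1 | h2)
        · exact Or.inl h1
        · exact Or.inr (List.mem_cons_of_mem _ h2)
      · rintro (h1 | h2)
        · exact Or.inl h1
        · rcases List.mem_cons.mp h2 with rfl | h3
          · exact Or.inl hy
          · exact Or.inr h3
    · rw [if_neg h, ih (d ++ [y]) x]
      simp only [List.mem_append, List.mem_singleton, List.mem_cons]
      tauto

lemma pvDist_append (d : List Int) (xs ys : List Int) :
    pvDist d (xs ++ ys) = pvDist (pvDist d xs) ys := by
  simp [pvDist, List.foldl_append]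

lemma pvDist_singleton_mem (d : List Int) (r : Int) (h : r ∈ d) : pvDist d [r] = d := by
  show (if d.contains r then d else d ++ [r]) = d
  rw [if_pos (by simpa using h)]

lemma pvDist_singleton_not_mem (d : List Int) (r : Int) (h : r ∉ d) :
    pvDist d [r] = d ++ [r] := by
  simp [pvDist]
  intro hc
  exact absurd hc h

lemma pvTable_length (D : List Int) (n : Nat) (pre : List Int) :
    (pvTable D n pre).length = n := by simp [pvTable]

lemma pvTable_nil (D : List Int) (n : Nat) :
    pvTable D n [] = (List.range n).map (fun _ => []) := by simp [pvTable]

lemma pvTable_getElem (D : List Int) (n : Nat) (pre : List Int) (j : Nat) (hj : j < n) :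
    (pvTable D n pre)[j]'(by simp [pvTable_length, hj]) =
      pre.filter (fun r => pvIdx D n r == j) := by
  simp [pvTable]

lemma mem_pvTable (D : List Int) (n : Nat) (pre : List Int) (j : Nat) (hj : j < n) (r : Int) :
    r ∈ (pvTable D n pre)[j]'(by simp [pvTable_length, hj]) ↔ r ∈ pre ∧ pvIdx D n r = j := by
  rw [pvTable_getElem D n pre j hj]
  simp [List.mem_filter]

lemma pvTable_append_singleton (D : List Int) (n : Nat) (pre : List Int) (r : Int)
    (hr : pvIdx D n r < n) :
    pvTable D n (pre ++ [r]) = (pvTable D n pre).modify (pvIdx D n r) (fun l => l ++ [r]) := by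
  apply List.ext_getElem
  · simp [pvTable_length]
  · intro j h1 h2
    have hj : j < n := by simpa [pvTable_length] using h1
    rw [List.getElem_modify]
    rw [pvTable_getElem D n (pre ++ [r]) j hj, pvTable_getElem D n pre j hj]
    rw [List.filter_append]
    by_cases hjr : pvIdx D n r = j
    · simp [hjr]
    · simp [hjr, Ne.symm hjr]

lemma pvInnerA_spec_some (r : Int) :
    ∀ (ls : List (List Int)) (k j0 : Nat) (hk : k < ls.length),
      r ∈ ls[k] → (∀ j (hj : j < k), r ∉ ls[j]'(by omega)) →
      pvInnerA r ls j0 = some (j0 + k) := by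
  intro ls
  induction ls with
  | nil => intro k j0 hk; simp at hk
  | cons l rest ih =>
    intro k j0 hk hmem hnot
    by_cases hc : l.contains r = true
    · have : k = 0 := by
        by_contra hk0
        exact hnot 0 (by omega) (by simpa using hc)
      subst this
      show (if l.contains r = true then some j0 else pvInnerA r rest (j0 + 1)) = some (j0 + 0)
      rw [if_pos hc]
      rfl
    · have hk0 : k ≠ 0 := by
        rintro rfl
        exact hc (by simpa using hmem)
      obtain ⟨k', rfl⟩ : ∃ k', k = k' + 1 := ⟨k - 1, by omega⟩
      have hrec := ih k' (j0 + 1) (by simpa using hk) (by simpa using hmem)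
        (fun j hj => by simpa using hnot (j + 1) (by omega))
      show (if l.contains r = true then some j0 else pvInnerA r rest (j0 + 1)) = _
      rw [if_neg hc, hrec]
      congr 1
      omega

lemma pvInnerA_spec_none (r : Int) :
    ∀ (ls : List (List Int)) (j0 : Nat), (∀ l ∈ ls, r ∉ l) → pvInnerA r ls j0 = none := by
  intro ls
  induction ls with
  | nil => intro j0 _; rfl
  | cons l rest ih =>
    intro j0 h
    have hc : l.contains r = false := by
      simp [List.contains_iff_mem]; exact h l (List.mem_cons_self)
    simp only [pvInnerA, hc]
    exact ih (j0 + 1) (fun l' hl' => h l' (List.mem_cons_of_mem _ hl'))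

lemma pvInnerA_table_mem (D : List Int) (n : Nat) (hn : 1 ≤ n) (pre : List Int) (r : Int)
    (hr : r ∈ pre) : pvInnerA r (pvTable D n pre) 0 = some (pvIdx D n r) := by
  have hlt : pvIdx D n r < n := Nat.mod_lt _ (by omega)
  have h := pvInnerA_spec_some r (pvTable D n pre) (pvIdx D n r) 0
    (by simpa [pvTable_length] using hlt)
    ((mem_pvTable D n pre _ hlt r).mpr ⟨hr, rfl⟩)
    (fun j hj => by
      intro hmem
      have := ((mem_pvTable D n pre j (by omega) r).mp hmem).2
      omega)
  simpa using h

lemma pvInnerA_table_not_mem (D : List Int) (n : Nat) (pre : List Int) (r : Int)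
    (hr : r ∉ pre) : pvInnerA r (pvTable D n pre) 0 = none := by
  apply pvInnerA_spec_none
  intro l hl
  simp only [pvTable, List.mem_map, List.mem_range] at hl
  obtain ⟨j, hj, rfl⟩ := hl
  intro hmem
  exact hr (List.mem_of_mem_filter hmem)

-- r ∈ D position facts
lemma pvIdx_of_new (D : List Int) (n : Nat) (d : List Int) (r : Int)
    (hpre : d ++ [r] <+: D) (hr : r ∉ d) : pvIdx D n r = d.length % n := by
  obtain ⟨t, ht⟩ := hpre
  have h1 : PySem.List.index? D r = some d.length := by
    rw [← ht, PySem.List.index?_append_of_mem t (by simp),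
      PySem.List.index?_append_singleton_self d r hr]
  unfold pvIdx
  rw [h1]
  rfl

-- the invariant-carrying induction for A's sticky loop
lemma pvMainA (D : List Int) (n : Nat) (hn : 1 ≤ n) :
    ∀ (rest pre : List Int) (idx : Int),
      pvDist [] (pre ++ rest) <+: D →
      (idx = (((pvDist [] pre).length % n : Nat) : Int) ∨ (n = 1 ∧ idx = 1)) →
      (∀ r ∈ rest, n = 1 → r ∈ pvDist [] pre) →
      (rest.foldl pvStepA (pvTable D n pre, idx)).1 = pvTable D n (pre ++ rest) := by
  intro rest
  induction rest with
  | nil => intro pre idx _ _ _; simp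
  | cons r rest' ih =>
    intro pre idx hpre hidx hone
    have hassoc : (pre ++ [r]) ++ rest' = pre ++ r :: rest' := by simp
    have hmemD : r ∈ pvDist [] pre ↔ r ∈ pre := by
      rw [mem_pvDist]; simp
    simp only [List.foldl_cons]
    by_cases hr : r ∈ pre
    · -- found in an existing server list
      have hstep : pvStepA (pvTable D n pre, idx) r =
          (pvTable D n (pre ++ [r]), idx) := by
        simp only [pvStepA, pvInnerA_table_mem D n hn pre r hr]
        rw [← pvTable_append_singleton D n pre r (Nat.mod_lt _ (by omega))]
      rw [hstep]
      have hd : pvDist [] (pre ++ [r]) = pvDist [] pre := by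
        rw [pvDist_append, pvDist_singleton_mem _ _ (hmemD.mpr hr)]
      have := ih (pre ++ [r]) idx
        (by rw [hassoc]; exact hpre)
        (by rwa [hd])
        (by intro x hx h1; rw [hd]; exact hone x (List.mem_cons_of_mem _ hx) h1)
      rwa [hassoc] at this
    · -- new value: placed at idx
      have hrd : r ∉ pvDist [] pre := fun h => hr (hmemD.mp h)
      have hidx' : idx = (((pvDist [] pre).length % n : Nat) : Int) := by
        rcases hidx with h | ⟨h1, h2⟩
        · exact h
        · exact absurd (hone r (List.mem_cons_self) h1) hrd
      have hdnew : pvDist [] (pre ++ [r]) = pvDist [] pre ++ [r] := by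
        rw [pvDist_append, pvDist_singleton_not_mem _ _ hrd]
      have hprefix : pvDist [] pre ++ [r] <+: D := by
        rw [← hdnew]
        calc pvDist [] (pre ++ [r]) <+: pvDist (pvDist [] (pre ++ [r])) rest' :=
              pvDist_prefix _ _
          _ = pvDist [] ((pre ++ [r]) ++ rest') := (pvDist_append _ _ _).symm
          _ = pvDist [] (pre ++ r :: rest') := by rw [hassoc]
          _ <+: D := hpre
      have hpvidx : pvIdx D n r = (pvDist [] pre).length % n :=
        pvIdx_of_new D n _ r hprefix hrd
      have hstep : pvStepA (pvTable D n pre, idx) r =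
          (pvTable D n (pre ++ [r]),
            ((((pvDist [] (pre ++ [r])).length % n : Nat) : Int))) := by
        simp only [pvStepA, pvInnerA_table_not_mem D n pre r hr]
        rw [Prod.mk.injEq]
        constructor
        · rw [pvTable_append_singleton D n pre r (Nat.mod_lt _ (by omega)), hidx']
          congr 1
          rw [hpvidx]
          omega
        · rw [hidx', pvTable_length, hdnew]
          have : ((((pvDist [] pre).length % n : Nat) : Int) + 1) =
              ((((pvDist [] pre).length % n + 1 : Nat)) : Int) := by push_cast; ring
          rw [this, PySem.Int.mod_natCast]
          congr 1
          simp [List.length_append]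
      rw [hstep]
      have := ih (pre ++ [r]) _
        (by rw [hassoc]; exact hpre)
        (Or.inl rfl)
        (by
          intro x hx h1
          rw [hdnew]
          exact List.mem_append_left _ (hone x (List.mem_cons_of_mem _ hx) h1))
      rwa [hassoc] at this
  
-- B's sticky fold produces the table
lemma pvMainB (D : List Int) (n : Nat) (servers : Int) (hn : 1 ≤ n) (hs : servers = (n : Int)) :
    ∀ (pre : List Int),
      pre.foldl (fun ans r =>
        ans.modify (PySem.Int.mod ((((PySem.List.index? D r).getD 0 : Nat)) : Int) servers).toNat
          (fun l => l ++ [r])) (pvTable D n []) = pvTable D n pre := by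
  intro pre
  induction pre using List.reverseRecOn with
  | nil => rfl
  | append_singleton xs x ih =>
    rw [List.foldl_append, ih]
    simp only [List.foldl_cons, List.foldl_nil]
    rw [hs, PySem.Int.mod_natCast]
    rw [pvTable_append_singleton D n xs x (Nat.mod_lt _ (by omega))]
    congr 1

lemma pvInit_eq (servers : Int) (n : Nat) (hs : servers = (n : Int)) (D : List Int) :
    ((PySem.List.pyRange 0 servers 1).map (fun _ => ([] : List Int))) = pvTable D n [] := by
  rw [pvTable_nil, hs, PySem.List.pyRange_one]
  simp [List.map_map, Function.comp_def]

-- ===== VERDICT (by name: the statement is the Claim_ definition above) =====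
theorem solution_spec : Claim_equal_solution := by
  intro servers sticky requests _ hpre
  unfold Spec_solution
  cases sticky with
  | false => rfl
  | true =>
    simp only [Pre_solution, if_pos] at hpre
    obtain ⟨hs1, hne, hone⟩ := hpre
    obtain ⟨r0, rs, rfl⟩ := List.exists_cons_of_ne_nil hne
    set n : Nat := servers.toNat with hn
    have hs : servers = (n : Int) := by omega
    have hn1 : 1 ≤ n := by omega
    set D : List Int := pvDist [] (r0 :: rs) with hD
    -- B's distinct list is D
    show solution servers true (r0 :: rs) = solution_alt servers true (r0 :: rs)
    have hBdist : (r0 :: rs).foldl (fun d r => if d.contains r then d else d ++ [r]) [] = D := rfl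
    -- head placement: D starts with r0
    have hD0 : pvDist [] [r0] = [r0] := by
      rw [pvDist_singleton_not_mem [] r0 (by simp)]; rfl
    have hDpre : [r0] <+: D := by
      rw [hD, show (r0 :: rs) = [r0] ++ rs from rfl, pvDist_append, hD0]
      exact pvDist_prefix _ _
    have hidx0 : pvIdx D n r0 = 0 := by
      obtain ⟨t, ht⟩ := hDpre
      have h1 : PySem.List.index? D r0 = some 0 := by
        rw [← ht]; exact PySem.List.index?_cons_self r0 t
      unfold pvIdx
      rw [h1]
      rfl
    -- A's side
    have hA : solution servers true (r0 :: rs) = (rs.foldl pvStepA (pvTable D n [r0], 1)).1 := by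
      simp only [solution, if_pos]
      rw [PySem.List.slice_from_one]
      congr 2
      rw [pvInit_eq servers n hs D, PySem.List.pyGetD_zero_cons]
      rw [show pvTable D n [r0] = pvTable D n ([] ++ [r0]) from rfl,
        pvTable_append_singleton D n [] r0 (by omega)]
      rw [hidx0]
    rw [hA]
    have hB : solution_alt servers true (r0 :: rs) = pvTable D n (r0 :: rs) := by
      simp only [solution_alt, if_pos]
      rw [hBdist]  -- no-op, definitional
      rw [pvInit_eq servers n hs D]
      exact pvMainB D n servers hn1 hs (r0 :: rs)
    rw [hB]
    have := pvMainA D n hn1 rs [r0] 1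
      (by rw [hD]; exact List.prefix_refl _)
      (by
        rcases Nat.lt_or_ge 1 n with h | h
        · left; rw [hD0]; simp [Nat.mod_eq_of_lt h]
        · right; exact ⟨by omega, rfl⟩)
      (by
        intro r hr h1
        have := hone (by omega)
        simp only [List.all_eq_true] at this
        have hr' := this r (List.mem_cons_of_mem _ hr)
        rw [hD0]
        simp only [List.headI] at hr'
        simp at hr' ⊢
        exact hr')
    simpa using this

@[simp]
theorem solution_raises : Claim_raises_solution := by
  unfold Claim_raises_solution
  constructor
  · intro servers sticky requests _ hR hP
    obtain ⟨hst, hcase⟩ := hR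
    subst hst
    simp only [Pre_solution, if_pos] at hP
    obtain ⟨_, hne, hall⟩ := hP
    rcases hcase with rfl | ⟨hs1, hany⟩
    · exact hne rfl
    · have := hall hs1
      simp only [List.all_eq_true] at this
      simp only [List.any_eq_true] at hany
      obtain ⟨x, hx, hxne⟩ := hany
      have := this x hx
      simp at this hxne
      exact hxne this
  · exact ⟨by decide, by decide, by decide⟩
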